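-- pv_equiv track=rewrite | github.com/enriching-digital-heritage/eval | bin/evaluate_disambiguation.py | make_unique_uris
-- ===== SOURCE A (Python) =====
-- def make_unique_uris(mydict):
--     for line_nbr in mydict:
--         for entity_label in mydict[line_nbr]:
--             for entity_text in mydict[line_nbr][entity_label]:
--                 seen = {}
--                 uri_list = []
--                 for uri in mydict[line_nbr][entity_label][entity_text]:
--                     if uri in seen:
--                         seen[uri] += 1
--                     else:
--                         seen[uri] = 1
--                     uri_list.append(f"{uri}_{seen[uri]}")
--                 mydict[line_nbr][entity_label][entity_text] = uri_list
--     return mydict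
-- ===== SOURCE B (Python) =====
-- def make_unique_uris(mydict):
--     def renumber(uris):
--         # inverted index: uri -> list of positions where it occurs
--         positions = {}
--         for i, uri in enumerate(uris):
--             positions.setdefault(uri, []).append(i)
--         # scatter: the k-th occurrence of a uri (k starting at 0) gets suffix _{k+1}
--         out = [None] * len(uris)
--         for uri, idxs in positions.items():
--             for k, i in enumerate(idxs):
--                 out[i] = f"{uri}_{k + 1}"
--         return out
--
--     return {line_nbr: {entity_label: {entity_text: renumber(uris)
--                                       for entity_text, uris in entities.items()}
--                        for entity_label, entities in labels.items()}
--             for line_nbr, labels in mydict.items()}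
-- ===== Notes on version B (the rewrite author's own statement) =====
-- stated objective: alternative
-- what changed: B replaces A's single sequential pass with a running per-uri counter dict by a group-then-scatter algorithm: it first builds an inverted index uri -> list of occurrence positions, then writes the suffixed strings out of order into a preallocated slot list (the k-th position of each uri gets suffix _{k+1}); the nested dict is rebuilt by comprehensions instead of mutated in place.
import Mathlib
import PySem

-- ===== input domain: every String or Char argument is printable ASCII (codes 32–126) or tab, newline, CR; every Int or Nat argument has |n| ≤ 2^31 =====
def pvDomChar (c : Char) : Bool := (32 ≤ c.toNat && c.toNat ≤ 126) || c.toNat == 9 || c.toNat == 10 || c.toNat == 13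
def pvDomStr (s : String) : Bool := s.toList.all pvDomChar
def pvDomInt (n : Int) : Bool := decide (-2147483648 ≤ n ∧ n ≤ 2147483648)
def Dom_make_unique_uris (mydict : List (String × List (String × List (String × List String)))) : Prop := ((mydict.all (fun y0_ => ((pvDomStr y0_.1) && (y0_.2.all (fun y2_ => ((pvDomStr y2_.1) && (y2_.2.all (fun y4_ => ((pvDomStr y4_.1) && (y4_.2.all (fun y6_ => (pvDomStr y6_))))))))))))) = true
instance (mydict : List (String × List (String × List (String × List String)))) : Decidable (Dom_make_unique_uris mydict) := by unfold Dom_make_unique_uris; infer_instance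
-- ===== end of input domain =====

-- B replaces A's sequential running-counter pass by a group-then-scatter algorithm (inverted
-- index uri -> occurrence positions, then out-of-order writes into a preallocated slot list) and
-- rebuilds the nested dict instead of mutating it; equivalence is about the RETURN value only
-- (A mutates its argument in place, B does not).

-- ===== PORT A =====
-- inner 'for uri in …' loop of A: running 'seen' dict, appending f"{uri}_{seen[uri]}"
def uriLoopA (seen : PySem.Dict String Int) : List String → List String
  | [] => []
  | uri :: rest =>
    let seen' := if PySem.Dict.contains seen uri
                 then PySem.Dict.modify seen uri 0 (· + 1)
                 else PySem.Dict.insert seen uri 1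
    (uri ++ "_" ++ PySem.Int.toStr (PySem.Dict.getD seen' uri 0)) :: uriLoopA seen' rest

def loopTextsA : List (String × List String) → List (String × List String)
  | [] => []
  | (t, uris) :: rest => (t, uriLoopA PySem.Dict.empty uris) :: loopTextsA rest

def loopLabelsA : List (String × List (String × List String)) → List (String × List (String × List String))
  | [] => []
  | (lab, m) :: rest => (lab, loopTextsA m) :: loopLabelsA rest

def loopLinesA : List (String × List (String × List (String × List String))) → List (String × List (String × List (String × List String)))
  | [] => []
  | (ln, m) :: rest => (ln, loopLabelsA m) :: loopLinesA rest

def make_unique_uris (mydict : List (String × List (String × List (String × List String)))) : List (String × List (String × List (String × List String))) :=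
  loopLinesA mydict

-- ===== PORT B =====
-- renumber(uris) from Source B: first the inverted index uri -> list of its occurrence positions
-- (positions.setdefault(uri, []).append(i) is Dict.modify uri [] (· ++ [i])), then scatter
-- f"{uri}_{k+1}" into out[i] for the k-th recorded position i of each uri; the position i
-- comes from enumerate and is nonnegative, so '.toNat' is exact here.
def renumberB (uris : List String) : List String :=
  let positions : PySem.Dict String (List Int) :=
    (PySem.List.enumerate uris 0).foldl
      (fun d p => d.modify p.2 [] (fun l => l ++ [p.1])) PySem.Dict.empty
  let out0 : List (Option String) := List.replicate uris.length none
  let out := positions.items.foldl (fun out p =>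
      (PySem.List.enumerate p.2 0).foldl (fun out ki =>
        out.set ki.2.toNat (some (p.1 ++ "_" ++ PySem.Int.toStr (ki.1 + 1)))) out) out0
  out.map (fun o => o.getD "")

def make_unique_uris_alt (mydict : List (String × List (String × List (String × List String)))) : List (String × List (String × List (String × List String))) :=
  mydict.map (fun p => (p.1, p.2.map (fun q => (q.1, q.2.map (fun r => (r.1, renumberB r.2))))))

-- ===== PRECONDITION & SPEC =====
def Spec_make_unique_uris (mydict : List (String × List (String × List (String × List String)))) (out : List (String × List (String × List (String × List String)))) : Prop := out = make_unique_uris_alt mydict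
instance (mydict : List (String × List (String × List (String × List String)))) (out : List (String × List (String × List (String × List String)))) : Decidable (Spec_make_unique_uris mydict out) := by unfold Spec_make_unique_uris; infer_instance

-- ===== CLAIM (what is proved, stated in full; the proofs are below) =====
def Claim_equal_make_unique_uris : Prop := ∀ (mydict : List (String × List (String × List (String × List String)))), Dom_make_unique_uris mydict → Spec_make_unique_uris mydict (make_unique_uris mydict)

-- ===== LEMMAS AND PROOFS =====

-- the common positional reference: element j gets suffix 1 + (occurrences of uris[j] before j)
def refAt (uris : List String) (j : Nat) : String :=
  uris.getD j "" ++ "_" ++ PySem.Int.toStr (((uris.take j).count (uris.getD j "") : Int) + 1)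

-- ---- A-side: running-counter loop = positional reference ----

-- reference form of A's loop: suffix = 1 + count of u in the already-emitted prefix
def gRef (pref : List String) : List String → List String
  | [] => []
  | u :: rest => (u ++ "_" ++ PySem.Int.toStr ((pref.count u : Int) + 1)) :: gRef (pref ++ [u]) rest

theorem uriLoopA_eq_gRef (uris : List String) : ∀ (pref : List String) (seen : PySem.Dict String Int),
    (∀ u, seen.getD u 0 = (pref.count u : Int)) →
    uriLoopA seen uris = gRef pref uris := by
  induction uris with
  | nil => intro pref seen _; rfl
  | cons uri rest ih =>
    intro pref seen hinv
    have hstep : ∀ u, (if PySem.Dict.contains seen uri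
                       then PySem.Dict.modify seen uri 0 (· + 1)
                       else PySem.Dict.insert seen uri 1).getD u 0
                    = ((pref ++ [uri]).count u : Int) := by
      intro u
      by_cases hc : PySem.Dict.contains seen uri
      · rw [if_pos hc, PySem.Dict.getD_modify, List.count_append]
        by_cases hu : u = uri
        · subst hu; simp [hinv]
        · simp [hu, hinv, Ne.symm hu]
      · have h0 : seen.getD uri 0 = 0 :=
          PySem.Dict.getD_of_not_contains seen 0 (by simpa using hc)
        have hcnt : (pref.count uri : Int) = 0 := by rw [← hinv uri]; exact h0
        rw [if_neg hc, PySem.Dict.getD_insert, List.count_append]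
        by_cases hu : u = uri
        · subst hu; simp; omega
        · simp [hu, hinv, Ne.symm hu]
    have hhead : ((pref ++ [uri]).count uri : Int) = (pref.count uri : Int) + 1 := by
      simp [List.count_append]
    simp only [uriLoopA, gRef, List.cons.injEq]
    exact ⟨by rw [hstep uri, hhead], ih (pref ++ [uri]) _ hstep⟩

theorem gRef_positional (rest : List String) : ∀ (pref : List String),
    gRef pref rest = (List.range rest.length).map (fun t => refAt (pref ++ rest) (pref.length + t)) := by
  induction rest with
  | nil => intro pref; simp [gRef]
  | cons u rs ih =>
    intro pref
    rw [List.length_cons, List.range_succ_eq_map]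
    simp only [gRef, List.map_cons, List.map_map]
    have hg : (pref ++ u :: rs).getD pref.length "" = u := by
      rw [List.getD_eq_getElem?_getD, List.getElem?_append_right (Nat.le_refl _)]
      simp
    have hhead : refAt (pref ++ u :: rs) (pref.length + 0) = u ++ "_" ++ PySem.Int.toStr ((pref.count u : Int) + 1) := by
      simp only [refAt, Nat.add_zero, hg]
      rw [List.take_left]
    have htail : gRef (pref ++ [u]) rs
        = List.map ((fun t => refAt (pref ++ u :: rs) (pref.length + t)) ∘ Nat.succ) (List.range rs.length) := by
      rw [ih (pref ++ [u])]
      apply List.map_congr_left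
      intro t _
      simp only [Function.comp, List.append_assoc, List.singleton_append, List.length_append,
        List.length_cons, List.length_nil]
      congr 1
      omega
    rw [hhead, htail]

-- ---- B-side: inverted index + scatter = positional reference ----

-- a single write of the scatter loop
def wSet (out : List (Option String)) (w : Nat × String) : List (Option String) :=
  out.set w.1 (some w.2)

-- the write produced for the (k, i)-th enumerate pair of uri u's position list
def hW (u : String) (ki : Int × Int) : Nat × String :=
  (ki.2.toNat, u ++ "_" ++ PySem.Int.toStr (ki.1 + 1))

-- the positions of u in xs, enumerated from s
def occIdxs (xs : List String) (s : Int) (u : String) : List Int :=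
  ((PySem.List.enumerate xs s).filter (fun p => p.2 == u)).map (fun p => p.1)

theorem occIdxs_append (xs ys : List String) (s : Int) (u : String) :
    occIdxs (xs ++ ys) s u = occIdxs xs s u ++ occIdxs ys (s + xs.length) u := by
  simp [occIdxs, PySem.List.enumerate_append]

theorem occIdxs_cons_self (t : List String) (s : Int) (u : String) :
    occIdxs (u :: t) s u = s :: occIdxs t (s + 1) u := by
  simp [occIdxs, PySem.List.enumerate_cons]

theorem occIdxs_cons_ne (x : String) (t : List String) (s : Int) (u : String) (h : x ≠ u) :
    occIdxs (x :: t) s u = occIdxs t (s + 1) u := by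
  simp [occIdxs, PySem.List.enumerate_cons, h]

theorem occIdxs_length (xs : List String) (u : String) : ∀ s, (occIdxs xs s u).length = xs.count u := by
  induction xs with
  | nil => intro s; simp [occIdxs]
  | cons x t ih =>
    intro s
    by_cases h : x = u
    · subst h; rw [occIdxs_cons_self]; simp [ih]
    · rw [occIdxs_cons_ne x t s u h, ih]
      simp [h]

theorem occIdxs_ge (xs : List String) (u : String) (s : Int) : ∀ i ∈ occIdxs xs s u, s ≤ i := by
  intro i hi
  simp only [occIdxs, List.mem_map, List.mem_filter] at hi
  obtain ⟨p, ⟨hp, _⟩, rfl⟩ := hi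
  obtain ⟨k, hk, hpk⟩ := (PySem.List.mem_enumerate_iff xs s p).mp hp
  subst hpk
  simp

theorem occIdxs_mem (xs : List String) (u : String) (i : Int) (h : i ∈ occIdxs xs 0 u) :
    ∃ (k : Nat) (hk : k < xs.length), i = (k : Int) ∧ xs[k] = u := by
  simp only [occIdxs, List.mem_map, List.mem_filter] at h
  obtain ⟨p, ⟨hp, hpu⟩, rfl⟩ := h
  obtain ⟨k, hk, hpk⟩ := (PySem.List.mem_enumerate_iff xs 0 p).mp hp
  subst hpk
  exact ⟨k, hk, by simp, by simpa using hpu⟩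

theorem occIdxs_split (pre suf : List String) (u : String) :
    occIdxs (pre ++ u :: suf) 0 u
      = occIdxs pre 0 u ++ (pre.length : Int) :: occIdxs suf ((pre.length : Int) + 1) u := by
  rw [occIdxs_append, occIdxs_cons_self]
  norm_num

-- items of a dict with Nodup keys, as a map over its keys
theorem dict_items_eq {κ ν : Type} [BEq κ] [LawfulBEq κ] (d : PySem.Dict κ ν) (d0 : ν) (h : d.keys.Nodup) :
    d.items = d.keys.map (fun k => (k, d.getD k d0)) := by
  have h1 : d.keys.map (fun k => (k, d.getD k d0)) = d.items.map (fun p => (p.1, d.getD p.1 d0)) := by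
    simp only [PySem.Dict.keys, List.map_map]; rfl
  rw [h1]
  conv_lhs => rw [← List.map_id d.items]
  apply List.map_congr_left
  intro p hp
  have hg := PySem.Dict.getD_of_mem_items d (k := p.1) (v := p.2) (by simpa using hp) h d0
  rw [hg]
  simp

theorem positions_keys (uris : List String) :
    ((PySem.List.enumerate uris 0).foldl
      (fun d p => d.modify p.2 [] (fun l => l ++ [p.1])) PySem.Dict.empty).keys
      = PySem.Set.ofList uris := by
  have h := PySem.Dict.keys_foldl_modify_key (PySem.List.enumerate uris 0) (fun p => p.2)
      ([] : List Int) (fun _ p => (fun l => l ++ [p.1])) PySem.Dict.empty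
  simpa [PySem.Dict.keys_empty, PySem.List.map_snd_enumerate] using h

theorem positions_nodup (uris : List String) :
    ((PySem.List.enumerate uris 0).foldl
      (fun d p => d.modify p.2 [] (fun l => l ++ [p.1])) PySem.Dict.empty).keys.Nodup := by
  have h := PySem.Dict.nodup_keys_foldl_modify_key (PySem.List.enumerate uris 0) (fun p => p.2)
      ([] : List Int) (fun _ p => (fun l => l ++ [p.1])) PySem.Dict.empty PySem.Dict.nodup_keys_empty
  simpa using h

theorem positions_getD (uris : List String) (u : String) :
    ((PySem.List.enumerate uris 0).foldl
      (fun d p => d.modify p.2 [] (fun l => l ++ [p.1])) PySem.Dict.empty).getD u []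
      = occIdxs uris 0 u := by
  have h := PySem.Dict.getD_foldl_modify_append ((PySem.List.enumerate uris 0).map Prod.swap)
      (PySem.Dict.empty) u
  rw [List.foldl_map] at h
  simpa [occIdxs, List.filter_map, List.map_map, PySem.Dict.getD_empty, Function.comp] using h

theorem wfold_length (ws : List (Nat × String)) : ∀ out, (ws.foldl wSet out).length = out.length := by
  induction ws with
  | nil => intro out; rfl
  | cons w t ih => intro out; rw [List.foldl_cons, ih]; simp [wSet]

theorem wfold_ne (ws : List (Nat × String)) : ∀ (out : List (Option String)) (j : Nat),
    (∀ w ∈ ws, w.1 ≠ j) → (ws.foldl wSet out)[j]? = out[j]? := by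
  induction ws with
  | nil => intro out j _; rfl
  | cons w t ih =>
    intro out j h
    rw [List.foldl_cons, ih _ j (fun w' hw' => h w' (List.mem_cons_of_mem _ hw'))]
    simp only [wSet]
    exact List.getElem?_set_ne (h w List.mem_cons_self)

theorem wfold_split (ws1 ws2 : List (Nat × String)) (out : List (Option String)) (j : Nat) (v : String)
    (h2 : ∀ w ∈ ws2, w.1 ≠ j) (hj : j < out.length) :
    ((ws1 ++ (j, v) :: ws2).foldl wSet out)[j]? = some (some v) := by
  rw [List.foldl_append, List.foldl_cons, wfold_ne ws2 _ j h2]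
  simp only [wSet]
  exact List.getElem?_set_self (by rw [wfold_length]; exact hj)

theorem nested_eq_flat (items : List (String × List Int)) (out0 : List (Option String)) :
    items.foldl (fun out p =>
      (PySem.List.enumerate p.2 0).foldl (fun out ki =>
        out.set ki.2.toNat (some (p.1 ++ "_" ++ PySem.Int.toStr (ki.1 + 1)))) out) out0
    = (items.flatMap (fun p => (PySem.List.enumerate p.2 0).map (hW p.1))).foldl wSet out0 := by
  rw [List.foldl_flatMap]
  congr 1
  funext out p
  rw [List.foldl_map]
  rfl

theorem renumberB_positional (uris : List String) :
    renumberB uris = (List.range uris.length).map (fun j => refAt uris j) := by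
  simp only [renumberB]
  rw [dict_items_eq _ ([] : List Int) (positions_nodup uris), positions_keys]
  have hgd : ((PySem.Set.ofList uris).map (fun k =>
      (k, ((PySem.List.enumerate uris 0).foldl
        (fun d p => d.modify p.2 [] (fun l => l ++ [p.1])) PySem.Dict.empty).getD k [])))
      = (PySem.Set.ofList uris).map (fun u => (u, occIdxs uris 0 u)) :=
    List.map_congr_left (fun u _ => by rw [positions_getD])
  rw [hgd, nested_eq_flat]
  apply List.ext_getElem?
  intro j
  by_cases hj : j < uris.length
  · -- decompose the distinct-uri list around uris[j]
    have humem : uris[j] ∈ PySem.Set.ofList uris :=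
      (PySem.Set.mem_ofList uris _).mpr (List.getElem_mem hj)
    obtain ⟨K1, K2, hS⟩ := List.append_of_mem humem
    have hnd := PySem.Set.nodup_ofList uris
    rw [hS] at hnd
    have hK2 : uris[j] ∉ K2 := (List.nodup_cons.mp (List.Nodup.of_append_right hnd)).1
    -- decompose uris itself around position j
    have hdecomp : uris.take j ++ uris[j] :: uris.drop (j+1) = uris := by
      rw [List.getElem_cons_drop hj, List.take_append_drop]
    have hI : occIdxs uris 0 uris[j]
        = occIdxs (uris.take j) 0 uris[j]
          ++ (j : Int) :: occIdxs (uris.drop (j+1)) ((j : Int) + 1) uris[j] := by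
      have h2 := occIdxs_split (uris.take j) (uris.drop (j+1)) uris[j]
      rw [hdecomp] at h2
      simpa [List.length_take, Nat.min_eq_left (Nat.le_of_lt hj)] using h2
    have hcnt : ((occIdxs (uris.take j) 0 uris[j]).length : Int)
        = ((uris.take j).count uris[j] : Int) := by
      rw [occIdxs_length]
    -- the write list, split around the unique write to slot j
    have hW_eq : ((K1 ++ uris[j] :: K2).map (fun u => (u, occIdxs uris 0 u))).flatMap
          (fun p => (PySem.List.enumerate p.2 0).map (hW p.1))
        = ((K1.map (fun u => (u, occIdxs uris 0 u))).flatMap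
              (fun p => (PySem.List.enumerate p.2 0).map (hW p.1))
            ++ (PySem.List.enumerate (occIdxs (uris.take j) 0 uris[j]) 0).map (hW uris[j]))
          ++ (j, refAt uris j)
          :: ((PySem.List.enumerate (occIdxs (uris.drop (j+1)) ((j : Int) + 1) uris[j])
                (0 + ((occIdxs (uris.take j) 0 uris[j]).length : Int) + 1)).map (hW uris[j])
              ++ (K2.map (fun u => (u, occIdxs uris 0 u))).flatMap
                  (fun p => (PySem.List.enumerate p.2 0).map (hW p.1))) := by
      rw [List.map_append, List.map_cons, List.flatMap_append, List.flatMap_cons]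
      have hmid : hW uris[j] ((0 + ((occIdxs (uris.take j) 0 uris[j]).length : Int)), (j : Int))
          = (j, refAt uris j) := by
        simp [hW, refAt, hcnt, List.getElem?_eq_getElem hj]
      rw [hI, PySem.List.enumerate_append, PySem.List.enumerate_cons, List.map_append,
        List.map_cons, hmid]
      simp [List.append_assoc]
    rw [hS, hW_eq]
    have hws2 : ∀ w ∈ (PySem.List.enumerate (occIdxs (uris.drop (j+1)) ((j : Int) + 1) uris[j])
          (0 + ((occIdxs (uris.take j) 0 uris[j]).length : Int) + 1)).map (hW uris[j])
        ++ (K2.map (fun u => (u, occIdxs uris 0 u))).flatMap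
            (fun p => (PySem.List.enumerate p.2 0).map (hW p.1)), w.1 ≠ j := by
      intro w hw
      rcases List.mem_append.mp hw with hw | hw
      · obtain ⟨ki, hki, rfl⟩ := List.mem_map.mp hw
        obtain ⟨k, hk, hkik⟩ := (PySem.List.mem_enumerate_iff _ _ ki).mp hki
        subst hkik
        have hge := occIdxs_ge (uris.drop (j+1)) uris[j] ((j : Int) + 1) _ (List.getElem_mem hk)
        simp only [hW]
        omega
      · obtain ⟨p, hp, hwp⟩ := List.mem_flatMap.mp hw
        obtain ⟨u', hu', rfl⟩ := List.mem_map.mp hp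
        obtain ⟨ki, hki, rfl⟩ := List.mem_map.mp hwp
        obtain ⟨k, hk, hkik⟩ := (PySem.List.mem_enumerate_iff _ _ ki).mp hki
        subst hkik
        dsimp only at hk ⊢
        simp only [hW]
        intro heq
        obtain ⟨k', hk', hik', hval⟩ :=
          occIdxs_mem uris u' _ (List.getElem_mem (l := occIdxs uris 0 u') (by simpa using hk))
        have hk'j : k' = j := by omega
        subst hk'j
        rw [← hval] at hu'
        exact hK2 hu' 
    rw [List.getElem?_map, List.getElem?_map, List.getElem?_range hj,
      wfold_split _ _ _ j _ hws2 (by simp [hj])]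
    rfl
  · rw [List.getElem?_eq_none, List.getElem?_eq_none]
    · simp
      omega
    · simp only [List.length_map, wfold_length, List.length_replicate]
      omega

-- ---- outer traversals ----

theorem renumberB_eq_uriLoopA (uris : List String) :
    uriLoopA PySem.Dict.empty uris = renumberB uris := by
  rw [uriLoopA_eq_gRef uris [] PySem.Dict.empty (by intro u; simp [PySem.Dict.getD_empty]),
    renumberB_positional, gRef_positional]
  simp

theorem loopTextsA_eq (l : List (String × List String)) :
    loopTextsA l = l.map (fun r => (r.1, renumberB r.2)) := by
  induction l with
  | nil => rfl
  | cons r rest ih =>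
    obtain ⟨t, uris⟩ := r
    simp [loopTextsA, ih, renumberB_eq_uriLoopA]

theorem loopLabelsA_eq (l : List (String × List (String × List String))) :
    loopLabelsA l = l.map (fun q => (q.1, q.2.map (fun r => (r.1, renumberB r.2)))) := by
  induction l with
  | nil => rfl
  | cons q rest ih =>
    obtain ⟨lab, texts⟩ := q
    simp [loopLabelsA, ih, loopTextsA_eq]

theorem loopLinesA_eq (l : List (String × List (String × List (String × List String)))) :
    loopLinesA l = l.map (fun p => (p.1, p.2.map (fun q => (q.1, q.2.map (fun r => (r.1, renumberB r.2)))))) := by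
  induction l with
  | nil => rfl
  | cons p rest ih =>
    obtain ⟨ln, labs⟩ := p
    simp [loopLinesA, ih, loopLabelsA_eq]

-- ===== VERDICT (by name: the statement is the Claim_ definition above) =====
theorem make_unique_uris_spec : Claim_equal_make_unique_uris := by
  intro mydict _
  unfold Spec_make_unique_uris make_unique_uris make_unique_uris_alt
  exact loopLinesA_eq mydict
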